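-- pv_equiv track=rewrite | github.com/piotrlaski/spectrographer | spectroGrapher_triple.py | rangeTR
-- ===== SOURCE A (Python) =====
-- def rangeTR(arr, wl, rg):
--     '''
--     Creates a Time-resolved dataset with integrated range specified in rg frames around wl
--     '''
--     timeResolvedRange = []
--     line = [0,0,0]
--     for i in range (len(arr)):
--         if arr[i][1] == wl:
--             line[0] = arr[i][0]
--             line[1] = arr[i][1]
--             line[2] = 0
--             for j in range(i - rg, i + rg):
--                 line[2] = line[2] + arr[j][2]
--             timeResolvedRange.append(line[:])
--     return timeResolvedRange
-- ===== SOURCE B (Python) =====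
-- def rangeTR(arr, wl, rg):
--     '''
--     Same result as A, but each window sum is read off a prefix-sum array of
--     column 2 (with Python's negative-index wrap handled by splitting the
--     window at 0), instead of re-summing the window cells per matching row.
--     '''
--     n = len(arr)
--     P = [0]
--     for row in arr:
--         P.append(P[-1] + row[2])
--     out = []
--     for i, row in enumerate(arr):
--         if row[1] == wl:
--             if rg <= 0:
--                 s = 0
--             elif i - rg >= 0:
--                 s = P[i + rg] - P[i - rg]
--             else:
--                 s = (P[n] - P[n + i - rg]) + P[i + rg]
--             out.append([row[0], row[1], s])
--     return out
-- ===== Notes on version B (the rewrite author's own statement) =====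
-- stated objective: alternative
-- what changed: Replaces the per-match inner loop that re-sums 2*rg cells (with negative-index wraparound) by a prefix-sum array over column 2, each window sum becoming a difference of two prefix sums (three when the window wraps past index 0).
-- outside the precondition, e.g. on rangeTR([[1, 5]], 7, 0): A returns [], B raises IndexError
import Mathlib
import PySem

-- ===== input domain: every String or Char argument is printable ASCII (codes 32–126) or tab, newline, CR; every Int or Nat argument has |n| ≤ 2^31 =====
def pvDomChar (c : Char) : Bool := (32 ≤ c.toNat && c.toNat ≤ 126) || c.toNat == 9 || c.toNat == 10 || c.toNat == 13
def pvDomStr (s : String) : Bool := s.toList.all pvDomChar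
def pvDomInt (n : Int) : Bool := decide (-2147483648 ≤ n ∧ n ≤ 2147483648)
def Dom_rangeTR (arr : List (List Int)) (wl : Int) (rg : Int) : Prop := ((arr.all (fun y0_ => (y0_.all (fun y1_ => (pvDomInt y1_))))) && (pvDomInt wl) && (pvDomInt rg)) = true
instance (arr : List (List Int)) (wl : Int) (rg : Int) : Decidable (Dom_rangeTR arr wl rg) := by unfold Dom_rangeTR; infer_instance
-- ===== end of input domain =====

-- B replaces A's per-match window re-summation by a prefix-sum array over
-- column 2, reading each window sum as a prefix difference (wrapped windows split at 0).

-- ===== PORT A =====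
def rangeTR (arr : List (List Int)) (wl : Int) (rg : Int) : List (List Int) :=
  (PySem.List.pyRange 0 arr.length 1).foldl
    (fun acc i =>
      if PySem.List.pyGetD (PySem.List.pyGetD arr i []) 1 0 = wl then
        acc ++ [[PySem.List.pyGetD (PySem.List.pyGetD arr i []) 0 0,
                 PySem.List.pyGetD (PySem.List.pyGetD arr i []) 1 0,
                 (PySem.List.pyRange (i - rg) (i + rg) 1).foldl
                   (fun s j => s + PySem.List.pyGetD (PySem.List.pyGetD arr j []) 2 0) 0]]
      else acc) []

-- ===== PORT B =====
def rangeTR_alt (arr : List (List Int)) (wl : Int) (rg : Int) : List (List Int) :=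
  let n : Int := arr.length
  let P : List Int := arr.foldl
    (fun p row => p ++ [PySem.List.pyGetD p (-1) 0 + PySem.List.pyGetD row 2 0]) [0]
  (PySem.List.enumerate arr 0).foldl
    (fun out pr =>
      if PySem.List.pyGetD pr.2 1 0 = wl then
        let s : Int :=
          if rg ≤ 0 then 0
          else if 0 ≤ pr.1 - rg then
            PySem.List.pyGetD P (pr.1 + rg) 0 - PySem.List.pyGetD P (pr.1 - rg) 0
          else
            (PySem.List.pyGetD P n 0 - PySem.List.pyGetD P (n + pr.1 - rg) 0) +
              PySem.List.pyGetD P (pr.1 + rg) 0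
        out ++ [[PySem.List.pyGetD pr.2 0 0, PySem.List.pyGetD pr.2 1 0, s]]
      else out) []

-- ===== PRECONDITION & SPEC =====
-- Pre_ excludes inputs where A raises IndexError (a row shorter than 2 columns, or a
-- window index past either end of arr), and additionally requires EVERY row to have
-- ≥ 3 columns: A returns (ignoring column 2 of) a 2-column row that is never matched
-- nor windowed, while B's prefix pass reads column 2 of every row and raises there.
def Pre_rangeTR (arr : List (List Int)) (wl : Int) (rg : Int) : Prop :=
  (∀ row ∈ arr, 3 ≤ row.length) ∧
  (∀ i : Nat, i < arr.length → (arr.getD i []).getD 1 0 = wl →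
      rg ≤ 0 ∨ (rg ≤ (i : Int) + arr.length ∧ (i : Int) + rg ≤ arr.length))
instance (arr : List (List Int)) (wl : Int) (rg : Int) : Decidable (Pre_rangeTR arr wl rg) := by
  unfold Pre_rangeTR; infer_instance

def pvWitness_rangeTR : List (List Int) × Int × Int := ([[0,5,2],[1,5,3],[2,6,4]], 5, 1)

def Spec_rangeTR (arr : List (List Int)) (wl : Int) (rg : Int) (out : List (List Int)) : Prop := out = rangeTR_alt arr wl rg
instance (arr : List (List Int)) (wl : Int) (rg : Int) (out : List (List Int)) : Decidable (Spec_rangeTR arr wl rg out) := by unfold Spec_rangeTR; infer_instance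

-- ===== CLAIM (what is proved, stated in full; the proofs are below) =====
def Claim_equal_rangeTR : Prop := ∀ (arr : List (List Int)) (wl : Int) (rg : Int), Dom_rangeTR arr wl rg → Pre_rangeTR arr wl rg → Spec_rangeTR arr wl rg (rangeTR arr wl rg)

-- ===== LEMMAS AND PROOFS =====

-- column 2 of a row, Python-read with default (in range under Pre_)
def pvC2 (row : List Int) : Int := PySem.List.pyGetD row 2 0

-- A's wrapped cell read: arr[j][2]
def pvG (arr : List (List Int)) (j : Int) : Int := pvC2 (PySem.List.pyGetD arr j [])

-- mathematical prefix sum of column 2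
def pvP (arr : List (List Int)) (k : Int) : Int := ((arr.map pvC2).take k.toNat).sum

-- the tail of B's prefix list, as a structural recursion
def pvPref (s : Int) : List (List Int) → List Int
  | [] => []
  | r :: xs => (s + pvC2 r) :: pvPref (s + pvC2 r) xs

theorem pvPref_length (xs : List (List Int)) : ∀ s, (pvPref s xs).length = xs.length := by
  induction xs with
  | nil => intro s; rfl
  | cons r xs ih => intro s; simp [pvPref, ih]

theorem pvPref_build (xs : List (List Int)) : ∀ (p : List Int) (h : p ≠ []),
    xs.foldl (fun p row => p ++ [PySem.List.pyGetD p (-1) 0 + pvC2 row]) p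
      = p ++ pvPref (p.getLast h) xs := by
  induction xs with
  | nil => intro p h; simp [pvPref]
  | cons r xs ih =>
      intro p h
      simp only [List.foldl_cons, pvPref]
      rw [PySem.List.pyGetD_neg_one p 0 h]
      rw [ih (p ++ [p.getLast h + pvC2 r]) (by simp)]
      simp

theorem pvPref_getD (xs : List (List Int)) : ∀ (s : Int) (k : Nat), k ≤ xs.length →
    (s :: pvPref s xs).getD k 0 = s + ((xs.map pvC2).take k).sum := by
  induction xs with
  | nil =>
      intro s k hk
      simp only [List.length_nil, Nat.le_zero] at hk
      subst hk; simp
  | cons r xs ih =>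
      intro s k hk
      cases k with
      | zero => simp
      | succ k =>
          simp only [pvPref, List.getD_cons_succ, List.map_cons, List.take_succ_cons,
            List.sum_cons]
          rw [ih (s + pvC2 r) k (by simpa using hk)]
          ring

-- B's prefix list equals the mathematical prefix sums at every in-range index
theorem pvP_list (arr : List (List Int)) (k : Int) (h0 : 0 ≤ k) (hk : k ≤ (arr.length : Int)) :
    PySem.List.pyGetD
      (arr.foldl (fun p row => p ++ [PySem.List.pyGetD p (-1) 0 + PySem.List.pyGetD row 2 0]) [0])
      k 0 = pvP arr k := by
  have hb := pvPref_build arr [0] (by simp)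
  simp only [List.getLast_singleton] at hb
  have hfun : (fun (p : List Int) row => p ++ [PySem.List.pyGetD p (-1) 0 + PySem.List.pyGetD row 2 0])
      = fun p row => p ++ [PySem.List.pyGetD p (-1) 0 + pvC2 row] := by
    funext p row; simp [pvC2]
  rw [hfun, hb]
  show PySem.List.pyGetD ((0:Int) :: pvPref 0 arr) k 0 = pvP arr k
  have hlen : ((0:Int) :: pvPref 0 arr).length = arr.length + 1 := by
    simp [pvPref_length]
  rw [PySem.List.pyGetD_of_nonneg ((0:Int) :: pvPref 0 arr) 0 h0]
  have := pvPref_getD arr 0 k.toNat (by omega)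
  simpa [pvP] using this

theorem sum_take_add_one (l : List Int) (i : Nat) (h : i < l.length) :
    (l.take (i + 1)).sum = (l.take i).sum + l[i] := by
  rw [List.take_add_one, List.sum_append]
  simp [List.getElem?_eq_getElem h]

-- sum of A's inner loop over a nonnegative in-range segment
theorem pvSeg_nonneg (arr : List (List Int)) : ∀ (m : Nat) (a b : Int), (b - a).toNat = m →
    0 ≤ a → a ≤ b → b ≤ (arr.length : Int) →
    ((PySem.List.pyRange a b 1).map (pvG arr)).sum = pvP arr b - pvP arr a := by
  intro m
  induction m with
  | zero =>
      intro a b hm h0 hab hb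
      have : a = b := by omega
      subst this
      simp [PySem.List.pyRange_one_eq_nil (le_refl a)]
  | succ m ih =>
      intro a b hm h0 hab hb
      have hlt : a < b := by omega
      rw [PySem.List.pyRange_one_cons hlt]
      simp only [List.map_cons, List.sum_cons]
      rw [ih (a + 1) b (by omega) (by omega) (by omega) hb]
      have ha' : a.toNat < (arr.map pvC2).length := by simp; omega
      have hstep : pvP arr (a + 1) = pvP arr a + pvG arr a := by
        unfold pvP pvG
        rw [PySem.List.pyGetD_eq_getElem arr [] h0 (by omega)]
        rw [show (a + 1).toNat = a.toNat + 1 from by omega]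
        rw [sum_take_add_one _ _ ha']
        simp
      omega

-- the wrapped (negative) part of the window shifts by arr.length
theorem pvSeg_shift (arr : List (List Int)) : ∀ (m : Nat) (a b : Int), (b - a).toNat = m →
    -(arr.length : Int) ≤ a → b ≤ 0 →
    ((PySem.List.pyRange a b 1).map (pvG arr)).sum
      = ((PySem.List.pyRange ((arr.length : Int) + a) ((arr.length : Int) + b) 1).map (pvG arr)).sum := by
  intro m
  induction m with
  | zero =>
      intro a b hm ha hb
      have hba : b ≤ a := by omega
      rw [PySem.List.pyRange_one_eq_nil hba, PySem.List.pyRange_one_eq_nil (by omega)]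
  | succ m ih =>
      intro a b hm ha hb
      have hlt : a < b := by omega
      rw [PySem.List.pyRange_one_cons hlt]
      conv_rhs => rw [PySem.List.pyRange_one_cons (show (arr.length : Int) + a < (arr.length : Int) + b by omega)]
      simp only [List.map_cons, List.sum_cons]
      rw [ih (a + 1) b (by omega) (by omega) hb]
      have hg : pvG arr a = pvG arr ((arr.length : Int) + a) := by
        unfold pvG
        have hk : (0:Nat) < (-a).toNat := by omega
        have hk2 : (-a).toNat ≤ arr.length := by omega
        have hcast : a = -(((-a).toNat : Int)) := by omega
        rw [hcast, PySem.List.pyGetD_neg_natCast arr (-a).toNat [] hk hk2]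
        rw [PySem.List.pyGetD_eq_getElem arr [] (by omega) (by omega)]
        congr 2
        omega
      have h2 : (arr.length : Int) + (a + 1) = (arr.length : Int) + a + 1 := by ring
      rw [h2]
      omega

-- ===== VERDICT (by name: the statement is the Claim_ definition above) =====
theorem rangeTR_spec : Claim_equal_rangeTR := by
  intro arr wl rg _ hpre
  obtain ⟨hrows, hwin⟩ := hpre
  unfold Spec_rangeTR rangeTR rangeTR_alt
  rw [PySem.List.enumerate_eq_map_pyRange arr ([] : List Int), List.foldl_map]
  apply PySem.List.foldl_congr_mem
  intro acc j hj
  rw [PySem.List.mem_pyRange_one] at hj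
  obtain ⟨hj0, hjn⟩ := hj
  have hjn' : j < (arr.length : Int) := by simpa using hjn
  by_cases hwl : PySem.List.pyGetD (PySem.List.pyGetD arr j []) 1 0 = wl
  · rw [if_pos hwl, if_pos hwl]
    have hj' : j.toNat < arr.length := by omega
    have h1 : (arr.getD j.toNat []).getD 1 0 = wl := by
      rw [← PySem.List.pyGetD_of_nonneg arr [] hj0]
      rw [← hwl, PySem.List.pyGetD_of_nonneg _ 0 (by norm_num)]
      rfl
    have hwin' := hwin j.toNat hj' h1
    have hjj : ((j.toNat : Int)) = j := by omega
    rw [hjj] at hwin'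
    rw [PySem.List.foldl_add]
    rw [show (fun j' => PySem.List.pyGetD (PySem.List.pyGetD arr j' []) 2 0) = pvG arr from rfl]
    rcases le_or_gt rg 0 with hrg | hrg
    · rw [if_pos hrg, PySem.List.pyRange_one_eq_nil (by omega)]
      simp
    · rcases hwin' with h | ⟨hlo, hhi⟩
      · omega
      rw [if_neg (by omega)]
      rcases le_or_gt 0 (j - rg) with hpos | hneg
      · rw [if_pos hpos]
        rw [pvSeg_nonneg arr (j + rg - (j - rg)).toNat (j - rg) (j + rg) rfl hpos (by omega) (by omega)]
        rw [pvP_list arr (j + rg) (by omega) (by omega), pvP_list arr (j - rg) (by omega) (by omega)]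
        ring_nf
      · rw [if_neg (by omega)]
        rw [PySem.List.pyRange_one_append (j - rg) 0 (j + rg) (by omega) (by omega)]
        rw [List.map_append, List.sum_append]
        rw [pvSeg_shift arr (0 - (j - rg)).toNat (j - rg) 0 rfl (by omega) (le_refl 0)]
        have e0 : (arr.length : Int) + 0 = (arr.length : Int) := by ring
        rw [e0]
        rw [pvSeg_nonneg arr ((arr.length : Int) - ((arr.length : Int) + (j - rg))).toNat
              ((arr.length : Int) + (j - rg)) (arr.length : Int) rfl (by omega) (by omega) (by omega)]
        rw [pvSeg_nonneg arr (j + rg - 0).toNat 0 (j + rg) rfl (by omega) (by omega) (by omega)]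
        have e1 : (arr.length : Int) + (j - rg) = (arr.length : Int) + j - rg := by ring
        rw [e1]
        rw [pvP_list arr (arr.length : Int) (by omega) (by omega),
            pvP_list arr ((arr.length : Int) + j - rg) (by omega) (by omega),
            pvP_list arr (j + rg) (by omega) (by omega)]
        have e2 : pvP arr 0 = 0 := by simp [pvP]
        rw [e2]
        ring_nf
  · rw [if_neg hwl, if_neg hwl]
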